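-- pv_equiv track=rewrite | github.com/Marcos001/Filtered-Fuzzy-Time-Series | F-fts/FTS/Models/Huarng.py | cumulative_distribution
-- ===== SOURCE A (Python) =====
-- def cumulative_distribution(diff, base):
-- 	'''
-- 	Calcule as ocorrences of cumulative distribution
-- 	'''
-- 	cd = {}
-- 	lim =  base*10
-- 	for i in range(base, lim, base):
-- 		ocorrencias = 0
--
-- 		for j in diff:
-- 			if j >= i:
-- 				ocorrencias += 1
-- 			cd[i] = ocorrencias
-- 	return cd
-- ===== SOURCE B (Python) =====
-- def cumulative_distribution(diff, base):
--     """Sort once, then count each threshold's tail with a binary search."""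
--     s = sorted(diff)
--     n = len(s)
--     cd = {}
--     for k in range(1, 10):
--         i = k * base
--         lo, hi = 0, n
--         while lo < hi:
--             mid = (lo + hi) // 2
--             if s[mid] < i:
--                 lo = mid + 1
--             else:
--                 hi = mid
--         cd[i] = n - lo
--     return cd
-- ===== Notes on version B (the rewrite author's own statement) =====
-- stated objective: alternative
-- what changed: Replaces A's nine full rescans of diff (one per threshold) by one sort of diff followed by a hand-written binary search per threshold that counts its tail; Pre_ excludes base = 0, on which A raises ValueError (range step 0).
-- intended difference: On empty diff A returns {} (it only assigns keys inside the per-element loop) while B returns all nine thresholds base..9*base with count 0, the intended cumulative distribution of an empty sample. — e.g. on cumulative_distribution([], 1): A returns [], B returns [(1, 0), (2, 0), (3, 0), (4, 0), (5, 0), (6, 0), (7, 0), (8, 0), (9, 0)]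
import Mathlib
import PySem

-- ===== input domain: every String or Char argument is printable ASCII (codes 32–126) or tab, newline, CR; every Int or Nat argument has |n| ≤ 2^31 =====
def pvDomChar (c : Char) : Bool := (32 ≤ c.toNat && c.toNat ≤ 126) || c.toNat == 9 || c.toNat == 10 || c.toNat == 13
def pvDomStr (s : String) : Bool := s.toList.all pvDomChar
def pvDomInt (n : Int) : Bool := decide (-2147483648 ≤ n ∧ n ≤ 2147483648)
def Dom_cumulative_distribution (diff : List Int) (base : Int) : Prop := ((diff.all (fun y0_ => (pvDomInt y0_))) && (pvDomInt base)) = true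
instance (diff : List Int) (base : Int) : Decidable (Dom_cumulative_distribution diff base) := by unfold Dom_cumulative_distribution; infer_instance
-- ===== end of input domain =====

-- B sorts diff once and counts each threshold's tail by binary search instead of A's nine full rescans
-- (alternative algorithm); on empty diff B returns all nine thresholds with count 0 where A returns {} (D_ below).

-- ===== PORT A =====
def cumulative_distribution (diff : List Int) (base : Int) : List (Int × Int) :=
  let cd : PySem.Dict Int Int := PySem.Dict.empty
  let lim := base * 10
  let cd := (PySem.List.pyRange base lim base).foldl
    (fun cd i =>
      (diff.foldl
        (fun (st : Int × PySem.Dict Int Int) j =>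
          let occ := if j ≥ i then st.1 + 1 else st.1
          (occ, st.2.insert i occ))
        ((0 : Int), cd)).2)
    cd
  cd.items

-- ===== PORT B =====
-- the while-loop of Source B (lo, hi are the loop variables); fuel only makes the recursion structural,
-- it is always called with fuel = s.length ≥ hi - lo, so the guard never fires before lo = hi
def bsearchGo (s : List Int) (x : Int) : Nat → Int → Int → Int
  | 0, lo, _ => lo
  | fuel + 1, lo, hi =>
    if lo < hi then
      let mid := PySem.Int.floordiv (lo + hi) 2
      if PySem.List.pyGetD s mid 0 < x then bsearchGo s x fuel (mid + 1) hi
      else bsearchGo s x fuel lo mid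
    else lo

def cumulative_distribution_alt (diff : List Int) (base : Int) : List (Int × Int) :=
  let s := PySem.List.sorted diff (fun y => y) false
  let n : Int := (s.length : Int)
  let cd : PySem.Dict Int Int := PySem.Dict.empty
  let cd := (PySem.List.pyRange 1 10 1).foldl
    (fun cd k =>
      let i := k * base
      let lo := bsearchGo s i s.length 0 n
      cd.insert i (n - lo))
    cd
  cd.items

-- ===== PRECONDITION & SPEC =====
-- Pre_ excludes base = 0, on which A raises ValueError (range() with step 0).
def Pre_cumulative_distribution (diff : List Int) (base : Int) : Prop := base ≠ 0
instance (diff : List Int) (base : Int) : Decidable (Pre_cumulative_distribution diff base) := by unfold Pre_cumulative_distribution; infer_instance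
def pvWitness_cumulative_distribution : List Int × Int := ([1, 5, -3], 2)

-- On empty diff A returns {} (it only assigns keys inside the per-element loop) while B returns all nine
-- thresholds with count 0, which is the intended cumulative distribution of an empty sample.
def D_cumulative_distribution (diff : List Int) (base : Int) : Prop := diff = []
instance (diff : List Int) (base : Int) : Decidable (D_cumulative_distribution diff base) := by unfold D_cumulative_distribution; infer_instance

def Spec_cumulative_distribution (diff : List Int) (base : Int) (out : List (Int × Int)) : Prop := ¬ D_cumulative_distribution diff base → out = cumulative_distribution_alt diff base
instance (diff : List Int) (base : Int) (out : List (Int × Int)) : Decidable (Spec_cumulative_distribution diff base out) := by unfold Spec_cumulative_distribution; infer_instance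

def pvDiffWitness_cumulative_distribution : List Int × Int := ([], 1)
def pvDiffWitnessOut_cumulative_distribution : (List (Int × Int)) × (List (Int × Int)) :=
  ([], [(1, 0), (2, 0), (3, 0), (4, 0), (5, 0), (6, 0), (7, 0), (8, 0), (9, 0)])

-- ===== CLAIM (what is proved, stated in full; the proofs are below) =====
def Claim_unchanged_cumulative_distribution : Prop := ∀ (diff : List Int) (base : Int), Dom_cumulative_distribution diff base → Pre_cumulative_distribution diff base → Spec_cumulative_distribution diff base (cumulative_distribution diff base)
def Claim_changed_cumulative_distribution : Prop := Dom_cumulative_distribution (pvDiffWitness_cumulative_distribution.1) (pvDiffWitness_cumulative_distribution.2) ∧ Pre_cumulative_distribution (pvDiffWitness_cumulative_distribution.1) (pvDiffWitness_cumulative_distribution.2) ∧ D_cumulative_distribution (pvDiffWitness_cumulative_distribution.1) (pvDiffWitness_cumulative_distribution.2) ∧ cumulative_distribution (pvDiffWitness_cumulative_distribution.1) (pvDiffWitness_cumulative_distribution.2) = pvDiffWitnessOut_cumulative_distribution.1 ∧ cumulative_distribution_alt (pvDiffWitness_cumulative_distribution.1) (pvDiffWitness_cumulative_distribution.2) = pvDiffWitnessOut_cumulative_distribution.2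 ∧ pvDiffWitnessOut_cumulative_distribution.1 ≠ pvDiffWitnessOut_cumulative_distribution.2
def Claim_exact_cumulative_distribution : Prop := ∀ (diff : List Int) (base : Int), Dom_cumulative_distribution diff base → Pre_cumulative_distribution diff base → D_cumulative_distribution diff base → cumulative_distribution diff base ≠ cumulative_distribution_alt diff base

-- ===== LEMMAS AND PROOFS =====

lemma ediv_aux {m : Int} (hm : 0 < m) : (10 * m - 1) / m = 9 := by
  rw [show 10 * m - 1 = (m - 1) + m * 9 by ring, Int.add_mul_ediv_left _ _ (ne_of_gt hm),
    Int.ediv_eq_zero_of_lt (by omega) (by omega)]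
  norm_num

-- A's range of thresholds
lemma pyRange_base {base : Int} (hb : base ≠ 0) :
    PySem.List.pyRange base (base * 10) base = (List.range 9).map (fun (k : Nat) => base + base * (k : Int)) := by
  rcases lt_or_gt_of_ne hb with h | h
  · have hm : (0:Int) < -base := by omega
    simp only [PySem.List.pyRange, if_neg hb, if_neg (by omega : ¬ (0:Int) < base),
      if_pos (by nlinarith : base * 10 < base)]
    rw [show base - base * 10 + -base - 1 = 10 * (-base) - 1 by ring, ediv_aux hm]
    simp
  · simp only [PySem.List.pyRange, if_neg hb, if_pos h, if_pos (by nlinarith : base < base * 10)]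
    rw [show base * 10 - base + base - 1 = 10 * base - 1 by ring, ediv_aux h]
    simp

-- A's inner loop over a nonempty diff
lemma innerA (i : Int) (j : Int) (rest : List Int) (occ0 : Int) (cd : PySem.Dict Int Int) :
    ((j :: rest).foldl
        (fun (st : Int × PySem.Dict Int Int) j =>
          let occ := if j ≥ i then st.1 + 1 else st.1
          (occ, st.2.insert i occ))
        (occ0, cd)) =
      (occ0 + ((j :: rest).countP (fun x => decide (i ≤ x)) : Int),
        cd.insert i (occ0 + ((j :: rest).countP (fun x => decide (i ≤ x)) : Int))) := by
  induction rest generalizing j occ0 cd with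
  | nil =>
    simp only [List.foldl, List.countP_cons, List.countP_nil]
    split_ifs with h <;> simp_all <;> omega
  | cons j2 rest ih =>
    rw [show ((j :: j2 :: rest).foldl
        (fun (st : Int × PySem.Dict Int Int) j =>
          let occ := if j ≥ i then st.1 + 1 else st.1
          (occ, st.2.insert i occ))
        (occ0, cd)) = ((j2 :: rest).foldl
        (fun (st : Int × PySem.Dict Int Int) j =>
          let occ := if j ≥ i then st.1 + 1 else st.1
          (occ, st.2.insert i occ))
        ((if j ≥ i then occ0 + 1 else occ0), cd.insert i (if j ≥ i then occ0 + 1 else occ0))) from rfl]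
    rw [ih]
    rw [PySem.Dict.insert_insert_self]
    have : (if j ≥ i then occ0 + 1 else occ0) + ((j2 :: rest).countP (fun x => decide (i ≤ x)) : Int)
        = occ0 + ((j :: j2 :: rest).countP (fun x => decide (i ≤ x)) : Int) := by
      simp only [List.countP_cons]
      split_ifs with h <;> simp_all <;> push_cast <;> omega
    rw [this]

-- characterisation of A on nonempty diff
lemma A_char {diff : List Int} {base : Int} (hne : diff ≠ []) (hb : base ≠ 0) :
    cumulative_distribution diff base =
      (List.range 9).map (fun (k : Nat) =>
        (base + base * (k : Int), (diff.countP (fun j => decide (base + base * (k : Int) ≤ j)) : Int))) := by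
  obtain ⟨j, rest, rfl⟩ : ∃ j rest, diff = j :: rest := by
    cases diff with
    | nil => exact absurd rfl hne
    | cons j rest => exact ⟨j, rest, rfl⟩
  unfold cumulative_distribution
  dsimp only
  rw [pyRange_base hb, List.foldl_map]
  rw [PySem.List.foldl_congr_mem _ _
    (fun cd (k : Nat) => cd.insert (base + base * (k : Int))
      ((0:Int) + ((j :: rest).countP (fun x => decide (base + base * (k : Int) ≤ x)) : Int))) _
    (fun cd k _ => by rw [innerA])]
  rw [PySem.Dict.items_foldl_insert_fresh _ _ _ _
    (fun k _ => PySem.Dict.contains_empty _)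
    (by
      refine (List.nodup_range).map ?_
      intro x y hxy
      have : base * (x : Int) = base * (y : Int) := by linarith
      exact_mod_cast mul_left_cancel₀ hb this)]
  simp [show (PySem.Dict.empty : PySem.Dict Int Int).items = [] from rfl]

-- a sorted list splitting at position lo has exactly lo elements below x
lemma split_count (s : List Int) (x lo : Int) (h0 : 0 ≤ lo) (hlen : lo ≤ (s.length : Int))
    (h1 : ∀ (t : Nat) (ht : t < s.length), (t : Int) < lo → s[t] < x)
    (h2 : ∀ (t : Nat) (ht : t < s.length), lo ≤ (t : Int) → x ≤ s[t]) :
    (s.countP (fun y => decide (y < x)) : Int) = lo := by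
  have hr : lo.toNat ≤ s.length := by omega
  have : s.countP (fun y => decide (y < x)) = lo.toNat := by
    conv_lhs => rw [← List.take_append_drop lo.toNat s]
    rw [List.countP_append]
    have htake : (s.take lo.toNat).countP (fun y => decide (y < x)) = (s.take lo.toNat).length := by
      apply List.countP_eq_length.mpr
      intro y hy
      obtain ⟨t, ht, rfl⟩ := List.mem_iff_getElem.mp hy
      rw [List.length_take] at ht
      have ht' : t < s.length := by omega
      rw [List.getElem_take]
      simpa using h1 t ht' (by omega)
    have hdrop : (s.drop lo.toNat).countP (fun y => decide (y < x)) = 0 := by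
      apply List.countP_eq_zero.mpr
      intro y hy
      obtain ⟨t, ht, rfl⟩ := List.mem_iff_getElem.mp hy
      rw [List.length_drop] at ht
      rw [List.getElem_drop]
      have ht' : lo.toNat + t < s.length := by omega
      simpa using h2 _ ht' (by omega)
    rw [htake, hdrop, List.length_take]
    omega
  omega

-- correctness of Source B's binary search on a sorted list
lemma bsearchGo_spec (s : List Int) (x : Int) (hs : s.Pairwise (· ≤ ·)) :
    ∀ (fuel : Nat) (lo hi : Int), (hi - lo).toNat ≤ fuel → 0 ≤ lo → lo ≤ hi → hi ≤ (s.length : Int) →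
    (∀ (t : Nat) (ht : t < s.length), (t : Int) < lo → s[t] < x) →
    (∀ (t : Nat) (ht : t < s.length), hi ≤ (t : Int) → x ≤ s[t]) →
    bsearchGo s x fuel lo hi = (s.countP (fun y => decide (y < x)) : Int) := by
  have hmono := List.pairwise_iff_getElem.mp hs
  intro fuel
  induction fuel with
  | zero =>
    intro lo hi hfuel h0 hlohi hlen h1 h2
    have heq : lo = hi := by omega
    simp only [bsearchGo]
    exact (split_count s x lo h0 (by omega) h1 (fun t ht h => h2 t ht (by omega))).symm
  | succ fuel ih =>
    intro lo hi hfuel h0 hlohi hlen h1 h2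
    by_cases hlt : lo < hi
    · obtain ⟨hml, hmh⟩ := PySem.Int.floordiv_two_mid_bounds (le_of_lt hlt)
      set mid := PySem.Int.floordiv (lo + hi) 2 with hmid
      have hmlt : mid < hi := (PySem.Int.floordiv_lt_iff_lt_mul (by norm_num)).mpr (by omega)
      have hmid0 : 0 ≤ mid := by omega
      have hmidlen : mid < (s.length : Int) := by omega
      have hget : PySem.List.pyGetD s mid 0 = s[mid.toNat]'(by omega) :=
        PySem.List.pyGetD_eq_getElem s 0 hmid0 hmidlen
      simp only [bsearchGo, if_pos hlt, ← hmid, hget]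
      by_cases hc : s[mid.toNat]'(by omega) < x
      · rw [if_pos hc]
        apply ih (mid + 1) hi (by omega) (by omega) (by omega) hlen _ h2
        intro t ht htlt
        rcases lt_or_eq_of_le (show t ≤ mid.toNat by omega) with h | h
        · exact lt_of_le_of_lt (hmono t mid.toNat (by omega) (by omega) h) hc
        · subst h; exact hc
      · rw [if_neg hc]
        apply ih lo mid (by omega) h0 (by omega) (by omega) h1
        intro t ht htge
        rcases lt_or_eq_of_le (show mid.toNat ≤ t by omega) with h | h
        · exact le_trans (not_lt.mp hc) (hmono mid.toNat t (by omega) (by omega) h)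
        · subst h; exact not_lt.mp hc
    · have heq : lo = hi := by omega
      simp only [bsearchGo, if_neg hlt]
      exact (split_count s x lo h0 (by omega) h1 (fun t ht h => h2 t ht (by omega))).symm

-- B's binary search over sorted diff counts the elements below x
lemma bsearch_counts (diff : List Int) (x : Int) :
    bsearchGo (PySem.List.sorted diff (fun y => y) false) x
        (PySem.List.sorted diff (fun y => y) false).length 0
        ((PySem.List.sorted diff (fun y => y) false).length : Int) =
      (diff.countP (fun y => decide (y < x)) : Int) := by
  set s := PySem.List.sorted diff (fun y => y) false with hsdef
  have hs : s.Pairwise (· ≤ ·) := PySem.List.sorted_pairwise diff (fun y => y)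
  rw [bsearchGo_spec s x hs s.length 0 (s.length : Int) (by omega) (by omega) (by omega) (by omega)
    (fun t ht h => absurd h (by omega)) (fun t ht h => absurd h (by push_cast; omega))]
  congr 1
  exact (PySem.List.sorted_perm diff (fun y => y) false).countP_eq _

-- length minus the below-count is the at-least-count
lemma count_ge (l : List Int) (x : Int) :
    (l.length : Int) - (l.countP (fun y => decide (y < x)) : Int) =
      (l.countP (fun y => decide (x ≤ y)) : Int) := by
  induction l with
  | nil => simp
  | cons y l ih =>
    simp only [List.countP_cons, List.length_cons]
    rcases lt_or_ge y x with h | h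
    · rw [if_pos (by simpa using h), if_neg (by simp; omega)]
      push_cast
      omega
    · rw [if_neg (by simp; omega), if_pos (by simpa using h)]
      push_cast
      omega

-- characterisation of B
lemma B_char {diff : List Int} {base : Int} (hb : base ≠ 0) :
    cumulative_distribution_alt diff base =
      (List.range 9).map (fun (k : Nat) =>
        (base + base * (k : Int), (diff.countP (fun j => decide (base + base * (k : Int) ≤ j)) : Int))) := by
  unfold cumulative_distribution_alt
  dsimp only
  rw [PySem.List.pyRange_one]
  rw [show (((10 : Int) - 1).toNat) = 9 from rfl]
  rw [List.foldl_map]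
  set s := PySem.List.sorted diff (fun y => y) false with hsdef
  rw [PySem.Dict.items_foldl_insert_fresh (List.range 9)
    (fun (n : Nat) => ((1 : Int) + (n : Int)) * base)
    (fun (n : Nat) => (s.length : Int) - bsearchGo s (((1 : Int) + (n : Int)) * base) s.length 0 (s.length : Int))
    PySem.Dict.empty
    (fun n _ => PySem.Dict.contains_empty _)
    (by
      refine (List.nodup_range).map ?_
      intro x y hxy
      have : ((1 : Int) + (x : Int)) = ((1 : Int) + (y : Int)) := mul_right_cancel₀ hb hxy
      omega)]
  rw [show (PySem.Dict.empty : PySem.Dict Int Int).items = [] from rfl, List.nil_append]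
  apply List.map_congr_left
  intro n hn
  refine Prod.ext (by ring) ?_
  dsimp only
  have hlen : s.length = diff.length := (PySem.List.sorted_perm diff (fun y => y) false).length_eq
  rw [bsearch_counts diff (((1 : Int) + (n : Int)) * base), hlen,
    count_ge diff (((1 : Int) + (n : Int)) * base)]
  congr 2
  ring

-- A on empty diff returns the empty dict
lemma A_nil (base : Int) : cumulative_distribution [] base = [] := by
  unfold cumulative_distribution
  simp
  rfl

-- ===== VERDICT (by name: the statement is the Claim_ definition above) =====
theorem cumulative_distribution_spec : Claim_unchanged_cumulative_distribution := by
  intro diff base _ hpre hd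
  have hne : diff ≠ [] := fun h => hd (by unfold D_cumulative_distribution; exact h)
  rw [A_char hne hpre, B_char hpre]

theorem cumulative_distribution_changed : Claim_changed_cumulative_distribution := by
  unfold Claim_changed_cumulative_distribution; decide

theorem cumulative_distribution_tight : Claim_exact_cumulative_distribution := by
  intro diff base _ hpre hd
  have h : diff = [] := hd
  subst h
  rw [A_nil, B_char hpre]
  intro h
  have := congrArg List.length h
  simp at this
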